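-- pv_equiv track=rewrite | github.com/Styrkar1/HR_PY1_Commits | Hopaverk16/Top-100.py | create_countries
-- ===== SOURCE A (Python) =====
-- def create_countries(dict_players):
--     the_dict = {}
--
--     for chess_player, chess_player_data in dict_players.items():
--
--         country = chess_player_data[COUNTRY]
--
--         if country in the_dict:
--             name_list = the_dict[country]
--             name_list.append(chess_player)
--         else:
--             name_list = [chess_player]
--             the_dict[country] = name_list
--
--     return the_dict
--
-- COUNTRY = 1
-- ===== SOURCE B (Python) =====
-- COUNTRY = 1
--
-- def create_countries(dict_players):
--     countries = list(dict.fromkeys(data[COUNTRY] for data in dict_players.values()))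
--     return {country: [player for player, data in dict_players.items()
--                       if data[COUNTRY] == country]
--             for country in countries}
-- ===== Notes on version B (the rewrite author's own statement) =====
-- stated objective: alternative
-- what changed: B first collects the distinct countries in first-appearance order with dict.fromkeys and then builds each group by a fresh comprehension scan over all players, instead of A's single accumulation pass that mutates a per-country list inside a growing dict.
import Mathlib
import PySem

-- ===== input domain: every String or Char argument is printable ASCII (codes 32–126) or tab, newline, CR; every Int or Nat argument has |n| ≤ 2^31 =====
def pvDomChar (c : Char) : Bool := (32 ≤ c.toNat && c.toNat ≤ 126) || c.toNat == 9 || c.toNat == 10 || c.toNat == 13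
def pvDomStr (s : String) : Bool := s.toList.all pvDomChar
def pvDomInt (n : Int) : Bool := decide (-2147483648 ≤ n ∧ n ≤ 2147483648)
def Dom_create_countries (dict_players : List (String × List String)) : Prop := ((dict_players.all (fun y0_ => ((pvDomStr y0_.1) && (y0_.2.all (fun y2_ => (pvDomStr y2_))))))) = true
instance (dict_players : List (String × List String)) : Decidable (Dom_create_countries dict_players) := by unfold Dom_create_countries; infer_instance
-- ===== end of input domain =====

-- B groups players by building the distinct-country list first (dict.fromkeys) and then
-- rescanning all players per country, instead of A's single accumulation pass into a dict;
-- an alternative decomposition of the same task, not faster.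

-- ===== PORT A =====
-- single pass: for each player, append to (or create) the list stored under data[COUNTRY]
def create_countries (dict_players : List (String × List String)) : List (String × List String) :=
  (dict_players.foldl
    (fun the_dict p =>
      let country := PySem.List.pyGetD p.2 1 ""
      match the_dict.get? country with
      | some name_list => the_dict.insert country (name_list ++ [p.1])
      | none => the_dict.insert country [p.1])
    PySem.Dict.empty).items

-- ===== PORT B =====
-- dict comprehension over the deduplicated country list: its keys are distinct and taken in
-- first-appearance order, so the resulting dict's items are exactly this map (insertion order).
def create_countries_alt (dict_players : List (String × List String)) : List (String × List String) :=
  let countries := PySem.List.dedup (dict_players.map (fun p => PySem.List.pyGetD p.2 1 ""))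
  countries.map (fun country =>
    (country, (dict_players.filter (fun p => PySem.List.pyGetD p.2 1 "" == country)).map (fun p => p.1)))

-- ===== PRECONDITION & SPEC =====
-- Pre_ excludes inputs where some player's data list has fewer than 2 entries:
-- there data[COUNTRY] (COUNTRY = 1) raises IndexError in A (and in B alike).
def Pre_create_countries (dict_players : List (String × List String)) : Prop :=
  ∀ p ∈ dict_players, 2 ≤ p.2.length
instance (dict_players : List (String × List String)) : Decidable (Pre_create_countries dict_players) := by unfold Pre_create_countries; infer_instance

def pvWitness_create_countries : (List (String × List String)) :=
  [("alice", ["2800", "IS"]), ("bob", ["2700", "IS"]), ("carol", ["2600", "NO"])]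

def Spec_create_countries (dict_players : List (String × List String)) (out : List (String × List String)) : Prop := out = create_countries_alt dict_players
instance (dict_players : List (String × List String)) (out : List (String × List String)) : Decidable (Spec_create_countries dict_players out) := by unfold Spec_create_countries; infer_instance

-- ===== CLAIM (what is proved, stated in full; the proofs are below) =====
def Claim_equal_create_countries : Prop := ∀ (dict_players : List (String × List String)), Dom_create_countries dict_players → Pre_create_countries dict_players → Spec_create_countries dict_players (create_countries dict_players)

-- ===== LEMMAS AND PROOFS =====

-- A's loop body is exactly Dict.modify with default [] (no key-uniqueness needed:
-- modify is defined as insert of f (getD …)).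
lemma stepA_eq_modify (d : PySem.Dict String (List String)) (p : String × List String) :
    (match d.get? (PySem.List.pyGetD p.2 1 "") with
      | some name_list => d.insert (PySem.List.pyGetD p.2 1 "") (name_list ++ [p.1])
      | none => d.insert (PySem.List.pyGetD p.2 1 "") [p.1]) =
    d.modify (PySem.List.pyGetD p.2 1 "") [] (· ++ [p.1]) := by
  cases h : d.get? (PySem.List.pyGetD p.2 1 "") with
  | none => simp [PySem.Dict.modify, PySem.Dict.getD_eq_get?_getD, h]
  | some v => simp [PySem.Dict.modify, PySem.Dict.getD_eq_get?_getD, h]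

-- ===== VERDICT (by name: the statement is the Claim_ definition above) =====
theorem create_countries_spec : Claim_equal_create_countries := by
  intro l _ _
  show _ = _
  unfold create_countries create_countries_alt
  have hstep : (fun (the_dict : PySem.Dict String (List String)) (p : String × List String) =>
      match the_dict.get? (PySem.List.pyGetD p.2 1 "") with
      | some name_list => the_dict.insert (PySem.List.pyGetD p.2 1 "") (name_list ++ [p.1])
      | none => the_dict.insert (PySem.List.pyGetD p.2 1 "") [p.1]) =
      (fun d p => (fun (d : PySem.Dict String (List String)) (q : String × String) =>
        d.modify q.1 [] (· ++ [q.2])) d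
        ((fun p : String × List String => (PySem.List.pyGetD p.2 1 "", p.1)) p)) :=
    funext fun d => funext fun p => stepA_eq_modify d p
  rw [hstep, ← List.foldl_map (f := fun p : String × List String => (PySem.List.pyGetD p.2 1 "", p.1))
    (g := fun (d : PySem.Dict String (List String)) (q : String × String) => d.modify q.1 [] (· ++ [q.2]))]
  set l' := l.map (fun p : String × List String => (PySem.List.pyGetD p.2 1 "", p.1)) with hl'
  have hkeys : ((l'.foldl (fun d q => d.modify q.1 [] (· ++ [q.2])) PySem.Dict.empty).keys)
      = PySem.Set.ofList (l.map (fun p : String × List String => PySem.List.pyGetD p.2 1 "")) := by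
    rw [PySem.Dict.keys_foldl_modify_key (key := Prod.fst)
      (f := fun (_ : PySem.Dict String (List String)) (q : String × String) => (· ++ [q.2]))]
    simp [hl', PySem.Set.update_nil_left, List.map_map, Function.comp_def]
  have hnd : ((l'.foldl (fun d q => d.modify q.1 [] (· ++ [q.2])) PySem.Dict.empty).keys).Nodup := by
    rw [hkeys]; exact PySem.Set.nodup_ofList _
  rw [PySem.Dict.items_eq_map_keys _ hnd ([] : List String), hkeys, PySem.List.dedup_eq_ofList]
  refine List.map_congr_left (fun k _ => ?_)
  rw [PySem.Dict.getD_foldl_modify_append]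
  simp [hl', List.filter_map, List.map_map, Function.comp_def, PySem.Dict.getD_empty]
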